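-- pv_equiv track=rewrite | github.com/EgorKhabarov/TODO-bot | tgbot/buttons_utils.py | encode_id
-- ===== SOURCE A (Python) =====
-- alphabet = "0123456789aAbBcCdDeEfFgGhHiIjJkKlLmMnNoOpPqQrRsStTuUvVwWxXyYzZ"
--
-- def int_str_exel(number: int) -> str:
--     result = ""
--     while number:
--         number, remainder = divmod(number - 1, len(alphabet))
--         result = alphabet[remainder] + result
--     return result
--
-- def encode_id(ids: tuple[int] | list[int]) -> str:
--     """
--     >>> encode_id([1, 2, 3, 4, 5, 6, 7, 8])
--     '0,,,,,,,'
--     >>> encode_id([1, 2, 4, 6, 8])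
--     '0,,3,5,7'
--     >>> encode_id([8, 6, 7, 5, 4, 3, 2, 1])
--     '7,5,,4,3,2,1,0'
--     >>> encode_id([1, 2, 4, 6, 8, 6, 4, 2, 1])
--     '0,,3,5,7,5,3,1,0'
--     """
--
--     result = []
--     for n, i in enumerate(ids):
--         abbreviated_int = int_str_exel(i)
--         if n == 0:
--             data = abbreviated_int
--         else:
--             diff = i - ids[n - 1]
--             if diff == 1:
--                 data = ","
--             else:
--                 data = f",{abbreviated_int}"
--         result.append(data)
--
--     return "".join(result) or "_"
-- ===== SOURCE B (Python) =====
-- alphabet = "0123456789aAbBcCdDeEfFgGhHiIjJkKlLmMnNoOpPqQrRsStTuUvVwWxXyYzZ"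
--
-- def int_str_exel(number: int) -> str:
--     if number == 0:
--         return ""
--     quotient, remainder = divmod(number - 1, len(alphabet))
--     return int_str_exel(quotient) + alphabet[remainder]
--
-- def encode_id(ids) -> str:
--     if not ids:
--         return "_"
--     it = iter(ids)
--     prev = next(it)
--     tokens = [int_str_exel(prev)]
--     for cur in it:
--         tokens.append("" if cur - prev == 1 else int_str_exel(cur))
--         prev = cur
--     return ",".join(tokens) or "_"
-- ===== Notes on version B (the rewrite author's own statement) =====
-- stated objective: simpler
-- what changed: A's single enumerate loop indexes ids[n-1] and embeds the comma separators inside each appended fragment, then concatenates with ''.join; B instead carries the previous element in an accumulator (no indexing), produces a list of plain per-element tokens, and joins them once with ','; the digit helper becomes a recursion appending digits instead of a loop prepending them.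
import Mathlib
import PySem

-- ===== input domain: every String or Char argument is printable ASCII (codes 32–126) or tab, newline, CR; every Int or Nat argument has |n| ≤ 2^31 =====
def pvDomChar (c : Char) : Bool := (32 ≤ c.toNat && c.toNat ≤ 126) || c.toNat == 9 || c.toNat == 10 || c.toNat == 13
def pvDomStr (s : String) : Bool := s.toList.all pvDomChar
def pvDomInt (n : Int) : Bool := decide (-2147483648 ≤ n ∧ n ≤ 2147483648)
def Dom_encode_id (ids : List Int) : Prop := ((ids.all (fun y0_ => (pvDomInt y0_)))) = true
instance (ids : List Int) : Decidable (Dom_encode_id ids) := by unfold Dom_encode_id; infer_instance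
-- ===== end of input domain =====

-- B replaces A's index-driven loop with comma-embedded fragments by a prev-carrying pass
-- producing plain tokens joined once with ','; return values only, no mutation.

-- ===== PORT A =====
def pvAlphabet : String := "0123456789aAbBcCdDeEfFgGhHiIjJkKlLmMnNoOpPqQrRsStTuUvVwWxXyYzZ"

-- A's int_str_exel: 'while number:' loop prepending alphabet[remainder].
-- Fuel (number.toNat suffices: the value strictly decreases while positive) only makes the
-- loop total: on negative input Python would loop forever; the guard exits there instead.
def intStrExelGo : Nat → Int → String → String
  | 0, _, result => result
  | fuel + 1, number, result =>
    if 0 < number then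
      intStrExelGo fuel (PySem.Int.floordiv (number - 1) (PySem.Str.len pvAlphabet))
        (String.ofList [(PySem.Str.pyGet? pvAlphabet (PySem.Int.mod (number - 1) (PySem.Str.len pvAlphabet))).getD '0'] ++ result)
    else result

def encode_id (ids : List Int) : String :=
  let result := (PySem.List.enumerate ids).foldl (fun acc p =>
    let n := p.1
    let i := p.2
    let abbreviated_int := intStrExelGo i.toNat i ""
    let data := if n = 0 then abbreviated_int
      else
        let diff := i - PySem.List.pyGetD ids (n - 1) 0
        if diff = 1 then "," else "," ++ abbreviated_int
    acc ++ [data]) ([] : List String)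
  let s := PySem.Str.join "" result
  if s = "" then "_" else s

-- ===== PORT B =====
-- B's int_str_exel: recursion appending alphabet[remainder]; same fuel guard for totality
-- (the 'number ≤ 0' test is Python's 'number == 0' base case, made total on negatives the same way).
def intStrExelRec : Nat → Int → String
  | 0, _ => ""
  | fuel + 1, number =>
    if number ≤ 0 then ""
    else
      intStrExelRec fuel (PySem.Int.floordiv (number - 1) (PySem.Str.len pvAlphabet)) ++
        String.ofList [(PySem.Str.pyGet? pvAlphabet (PySem.Int.mod (number - 1) (PySem.Str.len pvAlphabet))).getD '0']

def encode_id_alt (ids : List Int) : String :=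
  match ids with
  | [] => "_"
  | prev :: it =>
    let st := it.foldl
      (fun (st : Int × List String) cur =>
        (cur, st.2 ++ [if cur - st.1 = 1 then "" else intStrExelRec cur.toNat cur]))
      (prev, [intStrExelRec prev.toNat prev])
    let s := PySem.Str.join "," st.2
    if s = "" then "_" else s

-- ===== PRECONDITION & SPEC =====
def Spec_encode_id (ids : List Int) (out : String) : Prop := out = encode_id_alt ids
instance (ids : List Int) (out : String) : Decidable (Spec_encode_id ids out) := by unfold Spec_encode_id; infer_instance

-- ===== CLAIM (what is proved, stated in full; the proofs are below) =====
def Claim_equal_encode_id : Prop := ∀ (ids : List Int), Dom_encode_id ids → Spec_encode_id ids (encode_id ids)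

-- ===== LEMMAS AND PROOFS =====

theorem append_empty_str (s : String) : s ++ "" = s := by
  exact String.toList_inj.mp (by simp)

theorem go_eq (fuel : Nat) : ∀ (number : Int) (acc : String),
    intStrExelGo fuel number acc = intStrExelRec fuel number ++ acc := by
  induction fuel with
  | zero => intro number acc; simp [intStrExelGo, intStrExelRec]
  | succ f ih =>
    intro number acc
    by_cases h : 0 < number
    · rw [intStrExelGo, if_pos h, intStrExelRec, if_neg (by omega : ¬ number ≤ 0), ih,
        String.append_assoc]
    · rw [intStrExelGo, if_neg h, intStrExelRec, if_pos (by omega : number ≤ 0)]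
      simp

-- the per-element token list both programs denote
def tokensU (prev : Int) : List Int → List String
  | [] => []
  | c :: cs => (if c - prev = 1 then "" else intStrExelRec c.toNat c) :: tokensU c cs

theorem join_cons_cons (sep a b : String) (l : List String) : PySem.Str.join sep (a :: b :: l) = a ++ sep ++ PySem.Str.join sep (b :: l) := by
  have h : (PySem.Str.join sep (a :: b :: l)).toList = (a ++ sep ++ PySem.Str.join sep (b :: l)).toList := by
    simp [PySem.Str.toList_join, PySem.Chars.join_cons_cons]
  exact String.toList_inj.mp h

theorem join_empty_cons (a : String) (l : List String) :
    PySem.Str.join "" (a :: l) = a ++ PySem.Str.join "" l := by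
  cases l with
  | nil => simp [PySem.Str.join]
  | cons b bs => rw [join_cons_cons]; simp

theorem join_comma (l : List String) (e : String) :
    PySem.Str.join "" (e :: l.map (fun u => "," ++ u)) = PySem.Str.join "," (e :: l) := by
  induction l generalizing e with
  | nil => simp [PySem.Str.join]
  | cons x xs ih =>
    rw [List.map_cons, join_empty_cons, join_empty_cons, join_cons_cons, ← ih x,
      join_empty_cons]
    simp [String.append_assoc]

theorem comma_data (p : Prop) [Decidable p] (e : String) :
    (if p then "," else "," ++ e) = "," ++ (if p then "" else e) := by
  by_cases h : p <;> simp [h]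

-- B's loop produces exactly the token list
theorem foldB (rest : List Int) : ∀ (prev : Int) (acc : List String),
    (rest.foldl
      (fun (st : Int × List String) cur =>
        (cur, st.2 ++ [if cur - st.1 = 1 then "" else intStrExelRec cur.toNat cur]))
      (prev, acc)).2 = acc ++ tokensU prev rest := by
  induction rest with
  | nil => intro prev acc; simp [tokensU]
  | cons c cs ih => intro prev acc; simp [tokensU, ih c]

-- A's loop produces the token list with the commas glued onto each token
theorem foldA (ids : List Int) : ∀ (rest pre : List Int) (prev : Int) (acc : List String),
    ids = pre ++ rest → pre.getLast? = some prev →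
    (PySem.List.enumerate rest ((pre.length : Int))).foldl
      (fun acc p => acc ++ [if p.1 = 0 then intStrExelGo p.2.toNat p.2 ""
        else if p.2 - PySem.List.pyGetD ids (p.1 - 1) 0 = 1 then ","
        else "," ++ intStrExelGo p.2.toNat p.2 ""]) acc
      = acc ++ (tokensU prev rest).map (fun u => "," ++ u) := by
  intro rest
  induction rest with
  | nil => intro pre prev acc h1 h2; simp [tokensU, PySem.List.enumerate_nil]
  | cons c cs ih =>
    intro pre prev acc h1 h2
    have hpre : pre ≠ [] := by intro h; rw [h] at h2; simp at h2
    have hlen : 0 < pre.length := List.length_pos_iff.mpr hpre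
    rw [PySem.List.enumerate_cons, List.foldl_cons]
    have hne : ¬ ((pre.length : Int) = 0) := by omega
    have hidx : (pre.length : Int) - 1 = ((pre.length - 1 : Nat) : Int) := by omega
    have hget : PySem.List.pyGetD ids ((pre.length : Int) - 1) 0 = prev := by
      rw [hidx, PySem.List.pyGetD_natCast, h1, List.getD_append _ _ _ _ (by omega),
        List.getD_eq_getElem?_getD]
      rw [List.getLast?_eq_getElem? ] at h2
      simp [h2]
    rw [if_neg hne, hget, go_eq c.toNat c ""]
    have step : (if c - prev = 1 then "," else "," ++ (intStrExelRec c.toNat c ++ "")) =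
        "," ++ (if c - prev = 1 then "" else intStrExelRec c.toNat c) := by
      rw [append_empty_str]; exact comma_data _ _
    rw [step]
    rw [show (pre.length : Int) + 1 = (((pre ++ [c]).length : Nat) : Int) by simp]
    rw [ih (pre ++ [c]) c _ (by simp [h1]) (by simp)]
    simp [tokensU]

theorem encode_eq (ids : List Int) : encode_id ids = encode_id_alt ids := by
  cases ids with
  | nil => rfl
  | cons i0 rest =>
    unfold encode_id encode_id_alt
    simp only [PySem.List.enumerate_cons, List.foldl_cons, if_true, List.nil_append]
    rw [go_eq i0.toNat i0 "", append_empty_str,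
      show (0 + 1 : Int) = (([i0].length : Nat) : Int) from by simp,
      foldA (i0 :: rest) rest [i0] i0 _ (by simp) (by simp),
      show ([intStrExelRec i0.toNat i0] ++ (tokensU i0 rest).map (fun u => "," ++ u)) =
        intStrExelRec i0.toNat i0 :: (tokensU i0 rest).map (fun u => "," ++ u) from by simp,
      join_comma, foldB rest i0 [intStrExelRec i0.toNat i0]]
    rfl

-- ===== VERDICT (by name: the statement is the Claim_ definition above) =====
theorem encode_id_spec : Claim_equal_encode_id := by
  intro ids _
  exact encode_eq ids
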